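-- pv_equiv track=rewrite | github.com/peizhen123/BooklabFieldbook | fanfiction_racial_representation/test_dependency_parser.py | name_replace_preprocess_doc_raw
-- ===== SOURCE A (Python) =====
-- def name_replace_preprocess_doc_raw(doc_raw):
--     replacement_dict = {'Shang - Chi': 'Shang-Chi', 'Shang Chi': 'Shang-Chi', 'Ant Man': 'Ant-Man',
--                         'Ant - Man': 'Ant-Man', 'Yon - Rogg': 'Yon-Rogg', 'Yon Rogg': 'Yon-Rogg',
--                         'Spider - Man': 'Spider-Man', 'Spider Man': 'Spider-Man', 'Star Lord': 'Star-Lord',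
--                         'Star Lord': 'Star-Lord'}
--     for key in replacement_dict.keys():
--         doc_raw = doc_raw.replace(key, replacement_dict[key])
--     return doc_raw
-- ===== SOURCE B (Python) =====
-- def name_replace_preprocess_doc_raw(doc_raw):
--     table = [('Shang - Chi', 'Shang-Chi'), ('Shang Chi', 'Shang-Chi'),
--              ('Ant Man', 'Ant-Man'), ('Ant - Man', 'Ant-Man'),
--              ('Yon - Rogg', 'Yon-Rogg'), ('Yon Rogg', 'Yon-Rogg'),
--              ('Spider - Man', 'Spider-Man'), ('Spider Man', 'Spider-Man'),
--              ('Star Lord', 'Star-Lord')]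
--     out = []
--     i = 0
--     n = len(doc_raw)
--     while i < n:
--         for key, val in table:
--             if doc_raw.startswith(key, i):
--                 out.append(val)
--                 i += len(key)
--                 break
--         else:
--             out.append(doc_raw[i])
--             i += 1
--     return ''.join(out)
-- ===== Notes on version B (the rewrite author's own statement) =====
-- stated objective: alternative
-- what changed: A runs nine sequential full-string replace passes (one per dictionary key); B makes a single left-to-right scan that at each position emits the value of the first matching key and skips it, which is equivalent because the keys never overlap each other and no replacement value can start or contain a key.
import Mathlib
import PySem

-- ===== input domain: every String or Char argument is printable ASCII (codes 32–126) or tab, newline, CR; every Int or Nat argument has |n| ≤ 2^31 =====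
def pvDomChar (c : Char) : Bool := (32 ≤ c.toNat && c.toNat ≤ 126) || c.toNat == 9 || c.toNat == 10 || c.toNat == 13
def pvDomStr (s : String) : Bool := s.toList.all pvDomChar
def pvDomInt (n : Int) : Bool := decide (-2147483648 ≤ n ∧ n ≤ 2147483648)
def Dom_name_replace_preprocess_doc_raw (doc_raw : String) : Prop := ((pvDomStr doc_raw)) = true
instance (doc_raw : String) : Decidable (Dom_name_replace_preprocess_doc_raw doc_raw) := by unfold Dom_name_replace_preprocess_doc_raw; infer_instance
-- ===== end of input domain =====

-- B replaces A's nine sequential full-string replace passes by a single left-to-right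
-- scan that at each position substitutes the first matching key (alternative; not faster).

-- ===== PORT A =====
-- the dict literal, as an association list in insertion order (the duplicate 'Star Lord'
-- key of the source collapses to one entry, as in Python)
def pvDictA : List (String × String) :=
  [("Shang - Chi", "Shang-Chi"), ("Shang Chi", "Shang-Chi"), ("Ant Man", "Ant-Man"),
   ("Ant - Man", "Ant-Man"), ("Yon - Rogg", "Yon-Rogg"), ("Yon Rogg", "Yon-Rogg"),
   ("Spider - Man", "Spider-Man"), ("Spider Man", "Spider-Man"), ("Star Lord", "Star-Lord")]

-- for key in replacement_dict.keys(): doc_raw = doc_raw.replace(key, replacement_dict[key])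
def name_replace_preprocess_doc_raw (doc_raw : String) : String :=
  pvDictA.foldl (fun s kv => PySem.Str.replace s kv.1 kv.2) doc_raw

-- ===== PORT B =====
-- the (key, value) table of Source B, over code points
def pvTableB : List (List Char × List Char) :=
  [("Shang - Chi".toList, "Shang-Chi".toList), ("Shang Chi".toList, "Shang-Chi".toList),
   ("Ant Man".toList, "Ant-Man".toList), ("Ant - Man".toList, "Ant-Man".toList),
   ("Yon - Rogg".toList, "Yon-Rogg".toList), ("Yon Rogg".toList, "Yon-Rogg".toList),
   ("Spider - Man".toList, "Spider-Man".toList), ("Spider Man".toList, "Spider-Man".toList),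
   ("Star Lord".toList, "Star-Lord".toList)]

-- Source B's while-loop: at each position emit the value of the first matching key and skip
-- it (i += len(key)), otherwise copy one character (i += 1)
def pvScan (table : List (List Char × List Char)) : List Char → List Char
  | [] => []
  | c :: cs =>
    match table.find? (fun kv => kv.1.isPrefixOf (c :: cs)) with
    | some kv => kv.2 ++ pvScan table (List.drop (kv.1.length - 1) cs)
    | none => c :: pvScan table cs
termination_by cs => cs.length
decreasing_by
  all_goals simp [List.length_drop]

def name_replace_preprocess_doc_raw_alt (doc_raw : String) : String :=
  String.ofList (pvScan pvTableB doc_raw.toList)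

-- ===== PRECONDITION & SPEC =====
def Spec_name_replace_preprocess_doc_raw (doc_raw : String) (out : String) : Prop := out = name_replace_preprocess_doc_raw_alt doc_raw
instance (doc_raw : String) (out : String) : Decidable (Spec_name_replace_preprocess_doc_raw doc_raw out) := by unfold Spec_name_replace_preprocess_doc_raw; infer_instance

-- ===== CLAIM (what is proved, stated in full; the proofs are below) =====
def Claim_equal_name_replace_preprocess_doc_raw : Prop := ∀ (doc_raw : String), Dom_name_replace_preprocess_doc_raw doc_raw → Spec_name_replace_preprocess_doc_raw doc_raw (name_replace_preprocess_doc_raw doc_raw)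

-- ===== LEMMAS AND PROOFS =====

-- str.replace (nonempty pattern) as plain structural recursion over the char list
def repC (k v : List Char) : List Char → List Char
  | [] => []
  | c :: cs =>
    if k.isPrefixOf (c :: cs) then v ++ repC k v (List.drop (k.length - 1) cs)
    else c :: repC k v cs
termination_by cs => cs.length
decreasing_by
  all_goals simp [List.length_drop]

theorem go_eq_repC (k v : List Char) (hk : k ≠ []) :
    ∀ (fuel : Nat) (l acc : List Char), l.length ≤ fuel →
      PySem.Chars.replace.go k v fuel l acc = acc.reverse ++ repC k v l := by
  intro fuel
  induction fuel with
  | zero =>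
    intro l acc hl
    have : l = [] := List.length_eq_zero_iff.mp (Nat.le_zero.mp hl)
    subst this
    simp [PySem.Chars.replace.go, repC]
  | succ n ih =>
    intro l acc hl
    cases l with
    | nil => simp [PySem.Chars.replace.go, repC]
    | cons c t =>
      have hk1 : 1 ≤ k.length := by
        cases k with
        | nil => exact absurd rfl hk
        | cons a b => simp
      cases hp : k.isPrefixOf (c :: t) with
      | true =>
        simp only [PySem.Chars.replace.go, hp, if_true]
        rw [ih (List.drop k.length (c :: t)) (v.reverse ++ acc) (by simp at hl ⊢; omega)]
        have hd : List.drop k.length (c :: t) = List.drop (k.length - 1) t := by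
          cases k with
          | nil => exact absurd rfl hk
          | cons a b => simp
        rw [hd]
        rw [show repC k v (c :: t) = v ++ repC k v (List.drop (k.length - 1) t) by
          rw [repC]; simp [hp]]
        simp
      | false =>
        simp only [PySem.Chars.replace.go, hp]
        rw [ih t (c :: acc) (by simp at hl; omega)]
        rw [show repC k v (c :: t) = c :: repC k v t by rw [repC]; simp [hp]]
        simp

theorem replace_eq_repC (k v s : List Char) (hk : k ≠ []) :
    PySem.Chars.replace s k v = repC k v s := by
  rw [PySem.Chars.replace]
  simp only [List.isEmpty_eq_false_iff.mpr hk, Bool.false_eq_true, if_false]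
  rw [go_eq_repC k v hk s.length s [] (le_refl _)]
  simp

-- the table hypotheses the equivalence needs, checked by `decide` on the literal table:
-- keys nonempty and pairwise prefix-free, no proper key suffix starts or contains a key,
-- no key suffix starts or contains a value, no value suffix starts or contains a key
def GoodT (T : List (List Char × List Char)) : Prop :=
  (∀ kv ∈ T, kv.1 ≠ []) ∧
  (∀ kv1 ∈ T, ∀ kv2 ∈ T, kv1.1 <+: kv2.1 → kv1.1 = kv2.1) ∧
  (T.map Prod.fst).Nodup ∧
  (∀ kv1 ∈ T, ∀ kv2 ∈ T, ∀ p : Nat, p < kv1.1.length → 0 < p →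
      ¬ (kv1.1.drop p <+: kv2.1) ∧ ¬ (kv2.1 <+: kv1.1.drop p)) ∧
  (∀ kv1 ∈ T, ∀ kv2 ∈ T, ∀ p : Nat, p < kv1.1.length →
      ¬ (kv1.1.drop p <+: kv2.2) ∧ ¬ (kv2.2 <+: kv1.1.drop p)) ∧
  (∀ kv1 ∈ T, ∀ kv2 ∈ T, ∀ p : Nat, p < kv1.2.length →
      ¬ (kv1.2.drop p <+: kv2.1) ∧ ¬ (kv2.1 <+: kv1.2.drop p))

theorem goodT_tail {kv0 : List Char × List Char} {T : List (List Char × List Char)}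
    (h : GoodT (kv0 :: T)) : GoodT T := by
  obtain ⟨h1, h2, h3, h4, h5, h6⟩ := h
  refine ⟨fun a ha => h1 a (List.mem_cons_of_mem _ ha),
    fun a ha b hb => h2 a (List.mem_cons_of_mem _ ha) b (List.mem_cons_of_mem _ hb),
    ?_,
    fun a ha b hb => h4 a (List.mem_cons_of_mem _ ha) b (List.mem_cons_of_mem _ hb),
    fun a ha b hb => h5 a (List.mem_cons_of_mem _ ha) b (List.mem_cons_of_mem _ hb),
    fun a ha b hb => h6 a (List.mem_cons_of_mem _ ha) b (List.mem_cons_of_mem _ hb)⟩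
  simp only [List.map_cons] at h3
  exact h3.of_cons

-- a prefix of x ++ t is a prefix of x or an extension of x
theorem prefix_append_cases {α : Type} {a x t : List α} (h : a <+: x ++ t) :
    a <+: x ∨ x <+: a :=
  (List.prefix_or_prefix_of_prefix h (List.prefix_append x t))

-- a block x none of whose suffixes interacts with k passes through repC untouched
theorem repC_append (k v x t : List Char)
    (hx : ∀ p : Nat, p < x.length → ¬ (x.drop p <+: k) ∧ ¬ (k <+: x.drop p)) :
    repC k v (x ++ t) = x ++ repC k v t := by
  induction x with
  | nil => simp
  | cons c x' ih =>
    have h0 := hx 0 (by simp)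
    simp only [List.drop_zero] at h0
    have hnp : k.isPrefixOf ((c :: x') ++ t) = false := by
      rw [Bool.eq_false_iff]
      intro hb
      rcases prefix_append_cases (List.isPrefixOf_iff_prefix.mp hb) with h | h
      · exact h0.2 h
      · exact h0.1 h
    rw [List.cons_append, repC]
    simp only [← List.cons_append, hnp, Bool.false_eq_true, if_false]
    rw [List.cons_append, ih (fun p hp => by
      have := hx (p + 1) (by simp only [List.length_cons]; omega)
      simpa using this)]

-- a block x none of whose suffixes interacts with any key passes through pvScan untouched
theorem scan_append (T : List (List Char × List Char)) (x t : List Char)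
    (hx : ∀ p : Nat, p < x.length → ∀ kv ∈ T, ¬ (x.drop p <+: kv.1) ∧ ¬ (kv.1 <+: x.drop p)) :
    pvScan T (x ++ t) = x ++ pvScan T t := by
  induction x with
  | nil => simp
  | cons c x' ih =>
    have hfind : T.find? (fun kv => kv.1.isPrefixOf (c :: (x' ++ t))) = none := by
      rw [List.find?_eq_none]
      intro b hb hbp
      have h0 := hx 0 (by simp) b hb
      simp only [List.drop_zero] at h0
      rcases prefix_append_cases (show b.1 <+: (c :: x') ++ t by
        simpa using List.isPrefixOf_iff_prefix.mp hbp) with h | h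
      · exact h0.2 h
      · exact h0.1 h
    rw [List.cons_append, pvScan, hfind]
    rw [ih (fun p hp kv hkv => by
      have := hx (p + 1) (by simp only [List.length_cons]; omega) kv hkv
      simpa using this)]
    simp

-- replacing k by v creates no new match of a pattern x whose suffixes do not interact with v
theorem repC_pres (k v : List Char) :
    ∀ (s x : List Char),
      (∀ p : Nat, p < x.length → ¬ (x.drop p <+: v) ∧ ¬ (v <+: x.drop p)) →
      x ≠ [] → ¬ x <+: s → ¬ x <+: repC k v s := by
  suffices H : ∀ (n : Nat) (s : List Char), s.length ≤ n → ∀ (x : List Char),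
      (∀ p : Nat, p < x.length → ¬ (x.drop p <+: v) ∧ ¬ (v <+: x.drop p)) →
      x ≠ [] → ¬ x <+: s → ¬ x <+: repC k v s by
    intro s x hc hne hnp
    exact H s.length s le_rfl x hc hne hnp
  intro n
  induction n with
  | zero =>
    intro s hs x hc hne hnp
    have : s = [] := List.length_eq_zero_iff.mp (Nat.le_zero.mp hs)
    subst this
    intro hcon
    rw [repC] at hcon
    exact hne (List.prefix_nil.mp hcon)
  | succ n ih =>
    intro s hs x hc hne hnp
    cases s with
    | nil =>
      intro hcon
      rw [repC] at hcon
      exact hne (List.prefix_nil.mp hcon)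
    | cons c cs =>
      have hpos : 0 < x.length := List.length_pos_iff.mpr hne
      cases hp : k.isPrefixOf (c :: cs) with
      | true =>
        rw [repC]
        simp only [hp, if_true]
        intro hcon
        rcases prefix_append_cases hcon with h | h
        · exact (hc 0 hpos).1 (by simpa using h)
        · exact (hc 0 hpos).2 (by simpa using h)
      | false =>
        rw [repC]
        simp only [hp, Bool.false_eq_true, if_false]
        intro hcon
        cases x with
        | nil => exact hne rfl
        | cons c0 x2 =>
          rcases List.cons_prefix_cons.mp hcon with ⟨hc0, h2⟩
          cases x2 with
          | nil => exact hnp (by simp [hc0])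
          | cons d x3 =>
            have hnp2 : ¬ (d :: x3) <+: cs := by
              intro hcon2
              exact hnp (List.cons_prefix_cons.mpr ⟨hc0, hcon2⟩)
            exact ih cs (by simp at hs; omega) (d :: x3)
              (fun p hp' => by
                have := hc (p + 1) (by simp at hp' ⊢; omega)
                simpa using this)
              (by simp) hnp2 h2

theorem mem_eq_of_nodup_keys {T : List (List Char × List Char)}
    (hnd : (T.map Prod.fst).Nodup) {a b : List Char × List Char}
    (ha : a ∈ T) (hb : b ∈ T) (h : a.1 = b.1) : a = b := by
  induction T with
  | nil => cases ha
  | cons hd tl ih =>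
    simp only [List.map_cons, List.nodup_cons] at hnd
    rcases List.mem_cons.mp ha with ha' | ha' <;> rcases List.mem_cons.mp hb with hb' | hb'
    · rw [ha', hb']
    · subst ha'
      exfalso
      have hmem : b.1 ∈ tl.map Prod.fst := List.mem_map_of_mem hb'
      rw [← h] at hmem
      exact hnd.1 hmem
    · subst hb'
      exfalso
      have hmem : a.1 ∈ tl.map Prod.fst := List.mem_map_of_mem ha'
      rw [h] at hmem
      exact hnd.1 hmem
    · exact ih hnd.2 ha' hb'

theorem find?_eq_of_unique {α : Type} (p : α → Bool) :
    ∀ (T : List α) (a : α), a ∈ T → p a = true → (∀ b ∈ T, p b = true → b = a) →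
      T.find? p = some a := by
  intro T
  induction T with
  | nil => intro a ha; cases ha
  | cons hd tl ih =>
    intro a ha hpa huniq
    cases hph : p hd with
    | true =>
      rw [List.find?_cons_of_pos hph]
      exact congrArg some (huniq hd (List.mem_cons_self) hph)
    | false =>
      rw [List.find?_cons_of_neg (by simp [hph])]
      have ha' : a ∈ tl := by
        rcases List.mem_cons.mp ha with h | h
        · subst h; rw [hpa] at hph; cases hph
        · exact h
      exact ih a ha' hpa (fun b hb hpb => huniq b (List.mem_cons_of_mem _ hb) hpb)

theorem scan_nil : ∀ s : List Char, pvScan [] s = s := by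
  intro s
  induction s with
  | nil => rw [pvScan]
  | cons c cs ih =>
    rw [pvScan, List.find?_nil, ih]

-- one replace pass, then scanning with the remaining table, equals scanning with the full table
theorem step_lemma (k v : List Char) (T : List (List Char × List Char))
    (hG : GoodT ((k, v) :: T)) :
    ∀ s, pvScan ((k, v) :: T) s = pvScan T (repC k v s) := by
  obtain ⟨h1, h2, h3, h4, h5, h6⟩ := hG
  have hkmem : ((k, v) : List Char × List Char) ∈ (k, v) :: T := List.mem_cons_self
  have hknil : k ≠ [] := h1 _ hkmem
  have hk1 : 1 ≤ k.length := List.length_pos_iff.mpr hknil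
  have h3' : (T.map Prod.fst).Nodup := by
    simp only [List.map_cons] at h3
    exact h3.of_cons
  suffices H : ∀ (n : Nat) (s : List Char), s.length ≤ n →
      pvScan ((k, v) :: T) s = pvScan T (repC k v s) by
    intro s; exact H s.length s le_rfl
  intro n
  induction n with
  | zero =>
    intro s hs
    have : s = [] := List.length_eq_zero_iff.mp (Nat.le_zero.mp hs)
    subst this
    rw [repC, pvScan, pvScan]
  | succ n ih =>
    intro s hs
    cases s with
    | nil => rw [repC, pvScan, pvScan]
    | cons c cs =>
      by_cases hm : ∃ kv ∈ (k, v) :: T, kv.1 <+: (c :: cs)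
      · obtain ⟨kv0, hkv0mem, hkv0pre⟩ := hm
        have hkv0nil : kv0.1 ≠ [] := h1 _ hkv0mem
        have hkv0len : 1 ≤ kv0.1.length := List.length_pos_iff.mpr hkv0nil
        have huniq : ∀ b ∈ (k, v) :: T, (b.1.isPrefixOf (c :: cs)) = true → b = kv0 := by
          intro b hbmem hbp
          have hbpre := List.isPrefixOf_iff_prefix.mp hbp
          rcases List.prefix_or_prefix_of_prefix hbpre hkv0pre with h | h
          · exact mem_eq_of_nodup_keys h3 hbmem hkv0mem (h2 b hbmem kv0 hkv0mem h)
          · exact mem_eq_of_nodup_keys h3 hbmem hkv0mem (h2 kv0 hkv0mem b hbmem h).symm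
        have hfind : ((k, v) :: T).find? (fun kv => kv.1.isPrefixOf (c :: cs)) = some kv0 :=
          find?_eq_of_unique _ _ kv0 hkv0mem (List.isPrefixOf_iff_prefix.mpr hkv0pre) huniq
        have hdrop : List.drop (kv0.1.length - 1) cs = List.drop kv0.1.length (c :: cs) := by
          have he : kv0.1.length = (kv0.1.length - 1) + 1 := by omega
          conv_rhs => rw [he, List.drop_succ_cons]
        have hLHS : pvScan ((k, v) :: T) (c :: cs)
            = kv0.2 ++ pvScan ((k, v) :: T) (List.drop kv0.1.length (c :: cs)) := by
          rw [pvScan, hfind]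
          dsimp only
          rw [hdrop]
        obtain ⟨t, ht⟩ := hkv0pre
        by_cases hk0 : kv0 = (k, v)
        · subst hk0
          have hkpre : k <+: (c :: cs) := ⟨t, ht⟩
          have hRHS : repC k v (c :: cs) = v ++ repC k v (List.drop k.length (c :: cs)) := by
            rw [repC]
            simp only [List.isPrefixOf_iff_prefix.mpr hkpre, if_true, hdrop]
          rw [hLHS, hRHS]
          rw [scan_append T v _ (fun p hp kv hkv =>
            h6 (k, v) hkmem kv (List.mem_cons_of_mem _ hkv) p hp)]
          congr 1
          exact ih _ (by simp only [List.length_drop, List.length_cons] at hs ⊢; omega)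
        · have hkv0T : kv0 ∈ T := (List.mem_cons.mp hkv0mem).resolve_left hk0
          have hkne : kv0.1 ≠ k := by
            intro he
            exact hk0 (mem_eq_of_nodup_keys h3 hkv0mem hkmem he)
          have hside : ∀ p : Nat, p < kv0.1.length →
              ¬ (kv0.1.drop p <+: k) ∧ ¬ (k <+: kv0.1.drop p) := by
            intro p hp
            rcases Nat.eq_zero_or_pos p with hp0 | hp0
            · subst hp0
              simp only [List.drop_zero]
              constructor
              · intro hcon; exact hkne (h2 kv0 hkv0mem (k, v) hkmem hcon)
              · intro hcon; exact hkne (h2 (k, v) hkmem kv0 hkv0mem hcon).symm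
            · exact h4 kv0 hkv0mem (k, v) hkmem p hp hp0
          have hRHS : repC k v (c :: cs) = kv0.1 ++ repC k v t := by
            rw [← ht, repC_append k v kv0.1 t hside]
          have huniqT : ∀ b ∈ T, (b.1.isPrefixOf (kv0.1 ++ repC k v t)) = true → b = kv0 := by
            intro b hbmem hbp
            have hbpre := List.isPrefixOf_iff_prefix.mp hbp
            rcases prefix_append_cases hbpre with h | h
            · exact mem_eq_of_nodup_keys h3' hbmem hkv0T
                (h2 b (List.mem_cons_of_mem _ hbmem) kv0 hkv0mem h)
            · exact mem_eq_of_nodup_keys h3' hbmem hkv0T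
                (h2 kv0 hkv0mem b (List.mem_cons_of_mem _ hbmem) h).symm
          have hfindT : T.find? (fun kv => kv.1.isPrefixOf (kv0.1 ++ repC k v t)) = some kv0 := by
            refine find?_eq_of_unique _ _ kv0 hkv0T ?_ huniqT
            exact List.isPrefixOf_iff_prefix.mpr (List.prefix_append _ _)
          have hscanT : pvScan T (kv0.1 ++ repC k v t)
              = kv0.2 ++ pvScan T (repC k v t) := by
            cases hcase : kv0.1 ++ repC k v t with
            | nil =>
              exfalso
              rcases List.append_eq_nil_iff.mp hcase with ⟨h', _⟩
              exact hkv0nil h'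
            | cons d ds =>
              rw [pvScan, ← hcase, hfindT]
              dsimp only
              have : List.drop (kv0.1.length - 1) ds = repC k v t := by
                have : List.drop kv0.1.length (d :: ds) = repC k v t := by
                  rw [← hcase, List.drop_left]
                rw [← this]
                have he : kv0.1.length = (kv0.1.length - 1) + 1 := by omega
                conv_rhs => rw [he, List.drop_succ_cons]
              rw [this]
          rw [hLHS, hRHS, hscanT]
          congr 1
          have htlen : t = List.drop kv0.1.length (c :: cs) := by
            rw [← ht, List.drop_left]
          rw [← htlen] at hLHS ⊢
          apply ih
          have : t.length + kv0.1.length = (c :: cs).length := by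
            rw [← ht]; simp [Nat.add_comm]
          simp only [List.length_cons] at this hs
          omega
      · have hfind : ((k, v) :: T).find? (fun kv => kv.1.isPrefixOf (c :: cs)) = none := by
          rw [List.find?_eq_none]
          intro b hb hbp
          exact hm ⟨b, hb, List.isPrefixOf_iff_prefix.mp hbp⟩
        have hknp : k.isPrefixOf (c :: cs) = false := by
          rw [Bool.eq_false_iff]
          intro hb
          exact hm ⟨(k, v), hkmem, List.isPrefixOf_iff_prefix.mp hb⟩
        have hrep : repC k v (c :: cs) = c :: repC k v cs := by
          rw [repC]
          simp only [hknp, Bool.false_eq_true, if_false]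
        have hfindT : T.find? (fun kv => kv.1.isPrefixOf (c :: repC k v cs)) = none := by
          rw [List.find?_eq_none]
          intro b hb hbp
          have hb1 : ¬ b.1 <+: (c :: cs) := fun h => hm ⟨b, List.mem_cons_of_mem _ hb, h⟩
          have := repC_pres k v (c :: cs) b.1
            (fun p hp => h5 b (List.mem_cons_of_mem _ hb) (k, v) hkmem p hp)
            (h1 b (List.mem_cons_of_mem _ hb)) hb1
          rw [hrep] at this
          exact this (List.isPrefixOf_iff_prefix.mp hbp)
        rw [pvScan, hfind, hrep, pvScan, hfindT]
        dsimp only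
        rw [ih cs (by simp only [List.length_cons] at hs; omega)]

theorem master (T : List (List Char × List Char)) (hG : GoodT T) :
    ∀ s, T.foldl (fun s kv => repC kv.1 kv.2 s) s = pvScan T s := by
  induction T with
  | nil => intro s; rw [List.foldl_nil, scan_nil]
  | cons kv tl ih =>
    intro s
    rcases kv with ⟨k, v⟩
    rw [List.foldl_cons]
    rw [ih (goodT_tail hG) (repC k v s)]
    exact (step_lemma k v tl hG s).symm

theorem good_pvTableB : GoodT pvTableB := by unfold GoodT; decide

-- port A's string-level fold, moved to the char-list level
theorem foldl_replace_toList :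
    ∀ (L : List (String × String)) (s : String), (∀ kv ∈ L, kv.1.toList ≠ []) →
      (L.foldl (fun s kv => PySem.Str.replace s kv.1 kv.2) s).toList
        = (L.map (fun kv => (kv.1.toList, kv.2.toList))).foldl
            (fun cs kv => repC kv.1 kv.2 cs) s.toList := by
  intro L
  induction L with
  | nil => intro s _; simp
  | cons kv tl ih =>
    intro s hne
    simp only [List.foldl_cons, List.map_cons]
    rw [ih _ (fun b hb => hne b (List.mem_cons_of_mem _ hb))]
    congr 1
    rw [PySem.Str.toList_replace,
      replace_eq_repC _ _ _ (hne kv List.mem_cons_self)]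

theorem map_pvDictA : pvDictA.map (fun kv => (kv.1.toList, kv.2.toList)) = pvTableB := by decide

-- ===== VERDICT (by name: the statement is the Claim_ definition above) =====
theorem name_replace_preprocess_doc_raw_spec : Claim_equal_name_replace_preprocess_doc_raw := by
  intro doc _
  unfold Spec_name_replace_preprocess_doc_raw
  unfold name_replace_preprocess_doc_raw name_replace_preprocess_doc_raw_alt
  apply String.toList_inj.mp
  rw [String.toList_ofList]
  rw [foldl_replace_toList pvDictA doc (by decide)]
  rw [map_pvDictA]
  exact master pvTableB good_pvTableB doc.toList
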